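-- pv_equiv track=rewrite | github.com/arkdchst/kiber | sem_3/gait.py | parse_onair_dict
-- ===== SOURCE A (Python) =====
-- def check_lines(lines):
-- 	if len(lines) == 0 or len(lines[0]) == 0: return False
--
-- 	for line in lines:
-- 		if len(line) != len(lines[0]): return False
-- 		set_ = set(line)
-- 		if len(set_) > 2: return False
-- 		if not set_.issubset({'0','1'}): return False
-- 	return True
--
-- def parse_onair_dict(str_):
-- 	lines = str_.strip().split('\n')
-- 	if not check_lines(lines):
-- 		raise Exception('File format error')
--
-- 	onair = {x:[] for x in range(len(lines[0]))}
--
-- 	for line in lines: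
-- 		for key in range(len(line)):
-- 			onair[key].append(line[key] == '1')
--
-- 	return onair
-- ===== SOURCE B (Python) =====
-- def check_lines(lines):
-- 	if len(lines) == 0 or len(lines[0]) == 0: return False
--
-- 	for line in lines:
-- 		if len(line) != len(lines[0]): return False
-- 		set_ = set(line)
-- 		if len(set_) > 2: return False
-- 		if not set_.issubset({'0','1'}): return False
-- 	return True
--
-- def parse_onair_dict(str_):
-- 	lines = str_.strip().split('\n')
-- 	if not check_lines(lines):
-- 		raise Exception('File format error')
--
-- 	return {i: [c == '1' for c in col] for i, col in enumerate(zip(*lines))}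
-- ===== Notes on version B (the rewrite author's own statement) =====
-- stated objective: idiomatic
-- what changed: Replaces the row-major dict-of-lists mutation loop (pre-seeded empty dict, per-cell appends) with a single dict comprehension over enumerate(zip(*lines)), building each column list in one shot from the transposed rows.
import Mathlib
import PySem

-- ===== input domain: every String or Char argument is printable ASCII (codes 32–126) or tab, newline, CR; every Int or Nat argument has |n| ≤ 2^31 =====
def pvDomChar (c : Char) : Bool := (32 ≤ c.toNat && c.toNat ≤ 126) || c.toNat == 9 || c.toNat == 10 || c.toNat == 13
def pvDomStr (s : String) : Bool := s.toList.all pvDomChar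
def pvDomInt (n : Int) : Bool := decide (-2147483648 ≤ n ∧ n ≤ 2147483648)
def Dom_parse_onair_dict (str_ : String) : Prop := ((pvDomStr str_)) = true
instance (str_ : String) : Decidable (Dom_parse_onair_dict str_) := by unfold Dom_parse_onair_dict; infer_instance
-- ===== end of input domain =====

-- B replaces A's row-major dict-mutation loop with a map over the enumerated transpose (zip) of the rows; same result, idiomatic decomposition.

-- ===== PORT A =====
-- the per-line validation loop of check_lines
def check_lines_loop (first : List Char) : List (List Char) → Bool
  | [] => true
  | line :: rest =>
    if line.length ≠ first.length then false
    else
      let set_ := PySem.Set.ofList line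
      if 2 < set_.length then false
      else if ¬ (PySem.Set.issubset set_ (PySem.Set.ofList ['0', '1'])) then false
      else check_lines_loop first rest

def check_lines (lines : List (List Char)) : Bool :=
  if lines.length = 0 ∨ (PySem.List.pyGetD lines 0 []).length = 0 then false
  else check_lines_loop (PySem.List.pyGetD lines 0 []) lines

def parse_onair_dict (str_ : String) : List (Int × List Bool) :=
  let lines := PySem.Chars.splitOn (PySem.Chars.strip str_.toList) ['\n']
  if ¬ check_lines lines then []  -- Python raises Exception('File format error') here; excluded by Pre_
  else
    -- onair = {x: [] for x in range(len(lines[0]))}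
    let onair := (PySem.List.pyRange 0 ((PySem.List.pyGetD lines 0 []).length : Int) 1).foldl
        (fun d x => d.insert x ([] : List Bool)) PySem.Dict.empty
    -- for line in lines: for key in range(len(line)): onair[key].append(line[key] == '1')
    let onair := lines.foldl (fun d line =>
        (PySem.List.pyRange 0 (line.length : Int) 1).foldl
          (fun d key => d.modify key [] (fun l => l ++ [PySem.List.pyGetD line key ' ' == '1'])) d) onair
    onair.items

-- ===== PORT B =====
-- zip(*lines): truncating transpose, exactly Python's zip over the rows
def zipStar (ls : List (List Char)) : List (List Char) :=
  if h : ls ≠ [] ∧ ls.all (fun l => !l.isEmpty) then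
    ls.map (fun l => l.headD ' ') :: zipStar (ls.map List.tail)
  else []
termination_by (ls.headD []).length
decreasing_by
  obtain ⟨hne, hall⟩ := h
  match ls, hne with
  | a :: t, _ =>
    simp only [List.all_cons, Bool.and_eq_true, Bool.not_eq_true'] at hall
    have : a ≠ [] := by simpa [List.isEmpty_iff] using hall.1
    simp only [List.headD_cons]
    cases a with
    | nil => exact absurd rfl this
    | cons x xs => simp

def parse_onair_dict_alt (str_ : String) : List (Int × List Bool) :=
  let lines := PySem.Chars.splitOn (PySem.Chars.strip str_.toList) ['\n']
  if ¬ check_lines lines then []  -- Python raises Exception('File format error') here; excluded by Pre_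
  else
    -- {i: [c == '1' for c in col] for i, col in enumerate(zip(*lines))}
    (PySem.List.enumerate (zipStar lines)).map (fun p => (p.1, p.2.map (fun c => c == '1')))

-- ===== PRECONDITION & SPEC =====
-- Pre_ holds exactly when check_lines accepts: all rows of the stripped, '\n'-split input are nonempty,
-- of equal length, and made of '0'/'1' only; otherwise A raises Exception('File format error').
def Pre_parse_onair_dict (str_ : String) : Prop :=
  let lines := PySem.Chars.splitOn (PySem.Chars.strip str_.toList) ['\n']
  0 < (lines.headD []).length ∧
    ∀ line ∈ lines, line.length = (lines.headD []).length ∧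
      line.all (fun c => c == '0' || c == '1') = true
instance (str_ : String) : Decidable (Pre_parse_onair_dict str_) := by unfold Pre_parse_onair_dict; infer_instance

def pvWitness_parse_onair_dict : String := "10\n01"

def Spec_parse_onair_dict (str_ : String) (out : List (Int × List Bool)) : Prop := out = parse_onair_dict_alt str_
instance (str_ : String) (out : List (Int × List Bool)) : Decidable (Spec_parse_onair_dict str_ out) := by unfold Spec_parse_onair_dict; infer_instance

-- ===== CLAIM (what is proved, stated in full; the proofs are below) =====
def Claim_equal_parse_onair_dict : Prop := ∀ (str_ : String), Dom_parse_onair_dict str_ → Pre_parse_onair_dict str_ → Spec_parse_onair_dict str_ (parse_onair_dict str_)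

-- ===== LEMMAS AND PROOFS =====

-- under Pre_, check_lines accepts
theorem check_lines_loop_true (first : List Char) (lines : List (List Char))
    (h : ∀ line ∈ lines, line.length = first.length ∧ ∀ c ∈ line, c = '0' ∨ c = '1') :
    check_lines_loop first lines = true := by
  induction lines with
  | nil => rfl
  | cons line rest ih =>
    obtain ⟨hl, hc⟩ := h line (by simp)
    have hmem : ∀ x ∈ PySem.Set.ofList line, x = '0' ∨ x = '1' :=
      fun x hx => hc x ((PySem.Set.mem_ofList _ _).1 hx)
    have hnd := PySem.Set.nodup_ofList (α := Char) line
    have hlen2 : (PySem.Set.ofList line).length ≤ 2 := by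
      have hcard := List.toFinset_card_of_nodup hnd
      have hsub : (PySem.Set.ofList line).toFinset ⊆ ({'0', '1'} : Finset Char) := by
        intro x hx
        rcases hmem x (List.mem_toFinset.1 hx) with h | h <;> simp [h]
      have := Finset.card_le_card hsub
      simp at this
      omega
    have hsubset : PySem.Set.issubset (PySem.Set.ofList line) (PySem.Set.ofList ['0', '1']) = true := by
      simp only [PySem.Set.issubset, List.all_eq_true]
      intro x hx
      rcases hmem x hx with h | h <;> simp [h, PySem.Set.contains, PySem.Set.ofList]
    simp only [check_lines_loop]
    rw [if_neg (by simp [hl]), if_neg (by omega), if_neg (by simp [hsubset])]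
    exact ih (fun l hl => h l (by simp [hl]))

theorem check_lines_true (lines : List (List Char))
    (hw : 0 < (lines.headD []).length)
    (h : ∀ line ∈ lines, line.length = (lines.headD []).length ∧ ∀ c ∈ line, c = '0' ∨ c = '1') :
    check_lines lines = true := by
  have hne : lines ≠ [] := by
    intro h
    rw [h] at hw
    simp at hw
  have hget : PySem.List.pyGetD lines 0 [] = lines.headD [] := by
    rw [PySem.List.pyGetD_zero]
    cases lines <;> simp
  unfold check_lines
  rw [if_neg (by rw [hget]; rintro (h | h); exact hne (List.length_eq_zero_iff.1 h); omega)]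
  exact check_lines_loop_true _ _ (by rw [hget]; exact h)

-- the init loop: every key reads back []
theorem getD_init (l : List Int) (d : PySem.Dict Int (List Bool)) (k : Int) :
    ((l.foldl (fun d x => d.insert x ([] : List Bool)) d).getD k []) =
      if k ∈ l then [] else d.getD k [] := by
  induction l generalizing d with
  | nil => simp
  | cons a l ih =>
    simp only [List.foldl_cons, ih, List.mem_cons]
    rw [PySem.Dict.getD_insert]
    by_cases hk : k ∈ l <;> by_cases hka : k = a <;> simp [hk, hka]

-- Set.update by elements already present is the identity
theorem set_update_of_subset {α : Type} [BEq α] [LawfulBEq α] (s : PySem.Set α) (l : List α)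
    (h : ∀ x ∈ l, x ∈ s) : PySem.Set.update s l = s := by
  induction l generalizing s with
  | nil => rfl
  | cons a l ih =>
    have ha : PySem.Set.add s a = s := by
      simp [PySem.Set.add, PySem.Set.contains, h a (by simp)]
    simp only [PySem.Set.update, List.foldl_cons, ha]
    exact ih s (fun x hx => h x (by simp [hx]))

-- a fold of Set.add over fresh distinct elements appends them
theorem set_foldl_add_of_nodup {α : Type} [BEq α] [LawfulBEq α] (l : List α) (s : List α)
    (hnd : l.Nodup) (hdisj : ∀ x ∈ l, x ∉ s) : l.foldl PySem.Set.add s = s ++ l := by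
  induction l generalizing s with
  | nil => simp
  | cons a l ih =>
    obtain ⟨hna, hnd'⟩ := List.nodup_cons.1 hnd
    have ha : PySem.Set.add s a = s ++ [a] := by
      simp [PySem.Set.add, PySem.Set.contains, hdisj a (by simp)]
    simp only [List.foldl_cons, ha]
    rw [ih (s ++ [a]) hnd' (by
      intro x hx
      simp only [List.mem_append, List.mem_singleton, not_or]
      exact ⟨hdisj x (by simp [hx]), fun h => hna (h ▸ hx)⟩)]
    simp

theorem set_ofList_of_nodup {α : Type} [BEq α] [LawfulBEq α] (l : List α) (hnd : l.Nodup) :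
    PySem.Set.ofList l = l := by
  rw [PySem.Set.ofList_eq_foldl, set_foldl_add_of_nodup l [] hnd (by simp)]
  simp

-- the inner loop over a Nodup key list, on getD
theorem getD_inner (l : List Int) (hnd : l.Nodup) (f : Int → Bool)
    (d : PySem.Dict Int (List Bool)) (k : Int) :
    ((l.foldl (fun d key => d.modify key [] (fun s => s ++ [f key])) d).getD k []) =
      d.getD k [] ++ (if k ∈ l then [f k] else []) := by
  induction l generalizing d with
  | nil => simp
  | cons a l ih =>
    obtain ⟨hna, hnd'⟩ := List.nodup_cons.1 hnd
    simp only [List.foldl_cons, ih hnd', List.mem_cons]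
    rw [PySem.Dict.getD_modify]
    by_cases hka : k = a
    · subst hka
      simp [hna]
    · simp [hka]

-- the outer loop invariant: keys unchanged, each in-range key accumulates its column
theorem outer_fold (w : Nat) (lines : List (List Char)) (d : PySem.Dict Int (List Bool))
    (hlen : ∀ line ∈ lines, line.length = w)
    (hkeys : d.keys = PySem.List.pyRange 0 (w : Int) 1) :
    (lines.foldl (fun d line =>
        (PySem.List.pyRange 0 (line.length : Int) 1).foldl
          (fun d key => d.modify key [] (fun l => l ++ [PySem.List.pyGetD line key ' ' == '1'])) d) d).keys
        = PySem.List.pyRange 0 (w : Int) 1 ∧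
    ∀ k : Int, 0 ≤ k → k < (w : Int) →
      ((lines.foldl (fun d line =>
        (PySem.List.pyRange 0 (line.length : Int) 1).foldl
          (fun d key => d.modify key [] (fun l => l ++ [PySem.List.pyGetD line key ' ' == '1'])) d) d).getD k [])
        = d.getD k [] ++ lines.map (fun line => PySem.List.pyGetD line k ' ' == '1') := by
  induction lines generalizing d with
  | nil => exact ⟨hkeys, fun k _ _ => by simp⟩
  | cons line rest ih =>
    have hl : line.length = w := hlen line (by simp)
    have hndR := PySem.List.nodup_pyRange_one 0 (w : Int)
    have hkeys' : ((PySem.List.pyRange 0 (line.length : Int) 1).foldl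
        (fun d key => d.modify key [] (fun l => l ++ [PySem.List.pyGetD line key ' ' == '1'])) d).keys
        = PySem.List.pyRange 0 (w : Int) 1 := by
      rw [PySem.Dict.keys_foldl_modify, hkeys, hl]
      exact set_update_of_subset _ _ (fun x hx => hx)
    obtain ⟨hk, hg⟩ := ih _ (fun l hl => hlen l (by simp [hl])) hkeys'
    refine ⟨by simpa [List.foldl_cons] using hk, ?_⟩
    intro k h0 h1
    simp only [List.foldl_cons]
    rw [hg k h0 h1,
      getD_inner _ (by rw [hl]; exact hndR) (fun key => PySem.List.pyGetD line key ' ' == '1') d k]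
    have hkR : k ∈ PySem.List.pyRange 0 (line.length : Int) 1 := by
      rw [hl]
      exact PySem.List.mem_pyRange_one.2 ⟨h0, h1⟩
    simp [hkR]

-- zipStar on a nonempty list of equal-length rows is the index transpose
theorem zipStar_eq (w : Nat) : ∀ (lines : List (List Char)), lines ≠ [] →
    (∀ l ∈ lines, l.length = w) →
    zipStar lines = (List.range w).map (fun i => lines.map (fun l => l.getD i ' ')) := by
  induction w with
  | zero =>
    intro lines hne hlen
    rw [zipStar, dif_neg]
    · simp
    · rintro ⟨h1, h2⟩
      cases lines with
      | nil => exact hne rfl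
      | cons a t =>
        have ha : a = [] := List.length_eq_zero_iff.1 (hlen a (by simp))
        rw [ha] at h2
        simp at h2
  | succ n ih =>
    intro lines hne hlen
    rw [zipStar, dif_pos ⟨hne, by
      rw [List.all_eq_true]
      intro l hl
      have := hlen l hl
      cases l with
      | nil => simp at this
      | cons x xs => simp⟩]
    have h1 : (lines.map List.tail) ≠ [] := by simpa using hne
    have h2 : ∀ l ∈ lines.map List.tail, l.length = n := by
      intro l hl
      obtain ⟨m, hm, rfl⟩ := List.mem_map.1 hl
      have := hlen m hm
      simp only [List.length_tail]
      omega
    rw [ih _ h1 h2, List.range_succ_eq_map]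
    simp only [List.map_cons, List.map_map]
    congr 1
    · apply List.map_congr_left
      intro l hl
      have := hlen l hl
      cases l with
      | nil => simp at this
      | cons x xs => simp [List.getD]
    · apply List.map_congr_left
      intro i _
      apply List.map_congr_left
      intro l hl
      have := hlen l hl
      cases l with
      | nil => simp at this
      | cons x xs => simp [List.getD]

-- ===== VERDICT (by name: the statement is the Claim_ definition above) =====
theorem parse_onair_dict_spec : Claim_equal_parse_onair_dict := by
  intro str_ _ hpre
  simp only [Pre_parse_onair_dict] at hpre
  unfold Spec_parse_onair_dict
  set lines := PySem.Chars.splitOn (PySem.Chars.strip str_.toList) ['\n'] with hlines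
  obtain ⟨hw, hallb⟩ := hpre
  set w := (lines.headD []).length with hwdef
  have hall : ∀ line ∈ lines, line.length = w ∧ ∀ c ∈ line, c = '0' ∨ c = '1' := by
    intro line hl
    refine ⟨(hallb line hl).1, fun c hc => ?_⟩
    have := List.all_eq_true.1 (hallb line hl).2 c hc
    simpa using this
  have hne : lines ≠ [] := by
    intro h
    rw [hwdef, h] at hw
    simp at hw
  have hck : check_lines lines = true := check_lines_true lines hw hall
  have hget : PySem.List.pyGetD lines 0 [] = lines.headD [] := by
    rw [PySem.List.pyGetD_zero]
    cases lines <;> simp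
  have hndR := PySem.List.nodup_pyRange_one 0 (w : Int)
  simp only [parse_onair_dict, parse_onair_dict_alt, ← hlines, hck, not_true_eq_false,
    if_false, hget, ← hwdef]
  -- A side: characterise the dict fold
  have hkeys0 : ((PySem.List.pyRange 0 (w : Int) 1).foldl
      (fun d x => d.insert x ([] : List Bool)) PySem.Dict.empty).keys
      = PySem.List.pyRange 0 (w : Int) 1 := by
    rw [PySem.Dict.keys_foldl_insert]
    simp only [PySem.Dict.keys_empty, PySem.Set.update]
    rw [← PySem.Set.ofList_eq_foldl]
    exact set_ofList_of_nodup _ hndR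
  obtain ⟨hkf, hgf⟩ := outer_fold w lines _ (fun l hl => (hall l hl).1) hkeys0
  rw [PySem.Dict.items_eq_map_keys _ (by rw [hkf]; exact hndR) ([] : List Bool), hkf]
  -- B side: transpose + enumerate
  rw [zipStar_eq w lines hne (fun l hl => (hall l hl).1)]
  rw [PySem.List.enumerate_eq_map_pyRange _ ([] : List Char)]
  have hlencols : PySem.List.len ((List.range w).map (fun i => lines.map (fun l => l.getD i ' ')))
      = (w : Int) := by
    simp [PySem.List.len]
  rw [hlencols, List.map_map]
  apply List.map_congr_left
  intro j hj
  obtain ⟨h0, h1⟩ := PySem.List.mem_pyRange_one.1 hj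
  have hjn : j.toNat < w := by omega
  rw [hgf j h0 h1]
  have hd0 : ((PySem.List.pyRange 0 (w : Int) 1).foldl
      (fun d x => d.insert x ([] : List Bool)) PySem.Dict.empty).getD j [] = [] := by
    rw [getD_init]
    simp [hj]
  rw [hd0]
  simp only [Function.comp_apply, List.nil_append]
  have hcols : PySem.List.pyGetD ((List.range w).map (fun i => lines.map (fun l => l.getD i ' '))) j []
      = lines.map (fun l => l.getD j.toNat ' ') := by
    rw [PySem.List.pyGetD_eq_getElem _ _ h0 (by simp; omega)]
    simp
  rw [hcols, List.map_map]
  refine congrArg _ (List.map_congr_left ?_)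
  intro l hl
  have hlw : l.length = w := (hall l hl).1
  simp only [Function.comp_apply]
  rw [PySem.List.pyGetD_eq_getElem _ _ h0 (by omega), List.getD_eq_getElem l ' ' (by omega)]
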